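-- pv_equiv track=rewrite | github.com/AndreBormans123/Programming1_Dodona | object_orientatie/tussen_haakjes.py | getHaakjes
-- ===== SOURCE A (Python) =====
-- def getHaakjes(zin):
--     haakje = False
--     char = ""
--     for letter in zin:
--         if letter == "[":
--             haakje = True
--         elif letter == "]":
--             haakje = False
--         elif haakje == True:
--             char += letter
--
--     return char
-- ===== SOURCE B (Python) =====
-- def getHaakjes(zin):
--     # Jump from '[' to '[': collect, for each '[', the maximal following run of
--     # non-bracket characters, and join the runs.
--     pieces = []
--     n = len(zin)
--     i = 0
--     while i < n:
--         if zin[i] == "[":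
--             j = i + 1
--             while j < n and zin[j] != "[" and zin[j] != "]":
--                 j += 1
--             pieces.append(zin[i + 1:j])
--             i = j
--         else:
--             i += 1
--     return "".join(pieces)
-- ===== Notes on version B (the rewrite author's own statement) =====
-- stated objective: alternative
-- what changed: Replaces A's per-character boolean-flag loop by a scan that jumps to each '[', grabs the maximal following run of non-bracket characters as a slice, and joins the collected pieces.
import Mathlib
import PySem

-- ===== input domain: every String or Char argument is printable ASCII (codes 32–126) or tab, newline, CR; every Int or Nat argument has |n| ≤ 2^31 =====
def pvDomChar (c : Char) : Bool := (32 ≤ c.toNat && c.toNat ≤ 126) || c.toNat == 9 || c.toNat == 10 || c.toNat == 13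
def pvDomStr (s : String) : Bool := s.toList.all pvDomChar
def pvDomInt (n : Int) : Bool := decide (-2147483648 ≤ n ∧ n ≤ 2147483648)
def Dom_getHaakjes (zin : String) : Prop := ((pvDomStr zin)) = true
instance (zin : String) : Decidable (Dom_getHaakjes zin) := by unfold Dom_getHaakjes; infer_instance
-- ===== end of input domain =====

-- B replaces A's per-character flag loop by jumping from '[' to '[' and collecting,
-- for each '[', the maximal following run of non-bracket characters (objective: alternative).


-- ===== PORT A =====
-- A: for letter in zin: flip the flag on brackets, append the letter when the flag is up.
def getHaakjes (zin : String) : String :=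
  String.ofList (zin.toList.foldl
    (fun (st : Bool × List Char) letter =>
      if letter = '[' then (true, st.2)
      else if letter = ']' then (false, st.2)
      else if st.1 = true then (st.1, st.2 ++ [letter])
      else st)
    (false, [])).2

-- ===== PORT B =====
-- B's inner while loop (advance j past non-bracket chars, slice zin[i+1:j]):
-- returns (the maximal non-bracket prefix, the rest starting at the bracket / end).
def pvRun : List Char → List Char × List Char
  | [] => ([], [])
  | c :: cs =>
      if c ≠ '[' ∧ c ≠ ']' then
        let pr := pvRun cs
        (c :: pr.1, pr.2)
      else ([], c :: cs)

theorem pvRun_snd_length (cs : List Char) : (pvRun cs).2.length ≤ cs.length := by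
  induction cs with
  | nil => simp [pvRun]
  | cons c cs ih =>
      simp only [pvRun]
      split
      · simpa using Nat.le_succ_of_le ih
      · simp

-- B's outer while loop: on '[' collect a piece via pvRun and resume at i = j, else step on.
def pvGo : List Char → List (List Char)
  | [] => []
  | c :: cs =>
      if c = '[' then (pvRun cs).1 :: pvGo (pvRun cs).2
      else pvGo cs
termination_by cs => cs.length
decreasing_by
  · have := pvRun_snd_length cs; simp; omega
  · simp

-- "".join(pieces)
def getHaakjes_alt (zin : String) : String :=
  String.ofList (PySem.Chars.join [] (pvGo zin.toList))

-- ===== PRECONDITION & SPEC =====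
def Spec_getHaakjes (zin : String) (out : String) : Prop := out = getHaakjes_alt zin
instance (zin : String) (out : String) : Decidable (Spec_getHaakjes zin out) := by unfold Spec_getHaakjes; infer_instance

-- ===== CLAIM (what is proved, stated in full; the proofs are below) =====
def Claim_equal_getHaakjes : Prop := ∀ (zin : String), Dom_getHaakjes zin → Spec_getHaakjes zin (getHaakjes zin)

-- ===== LEMMAS AND PROOFS =====

-- A's loop, recursively: the characters A keeps from cs when the flag starts at b.
def pvFA : Bool → List Char → List Char
  | _, [] => []
  | b, c :: cs =>
      if c = '[' then pvFA true cs
      else if c = ']' then pvFA false cs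
      else if b then c :: pvFA b cs
      else pvFA b cs

theorem pvFA_foldl (cs : List Char) (b : Bool) (acc : List Char) :
    (cs.foldl
      (fun (st : Bool × List Char) letter =>
        if letter = '[' then (true, st.2)
        else if letter = ']' then (false, st.2)
        else if st.1 = true then (st.1, st.2 ++ [letter])
        else st)
      (b, acc)).2 = acc ++ pvFA b cs := by
  induction cs generalizing b acc with
  | nil => simp [pvFA]
  | cons c cs ih =>
      by_cases h1 : c = '['
      · simp [pvFA, h1, ih]
      · by_cases h2 : c = ']'
        · simp [pvFA, h2, ih]
        · cases b with
          | false => simp [pvFA, h1, h2, ih]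
          | true => simp [pvFA, h1, h2, ih]

theorem pvRun_spec (cs : List Char) :
    pvFA true cs = (pvRun cs).1 ++ pvFA false (pvRun cs).2 := by
  induction cs with
  | nil => simp [pvRun, pvFA]
  | cons c cs ih =>
      by_cases h : c ≠ '[' ∧ c ≠ ']'
      · simp [pvRun, pvFA, h, ih]
      · rcases Decidable.not_and_iff_not_or_not.mp h with h1 | h1 <;>
        · rw [Decidable.not_not] at h1
          subst h1
          simp [pvRun, pvFA]

theorem join_nil_cons (p : List Char) (ps : List (List Char)) :
    PySem.Chars.join [] (p :: ps) = p ++ PySem.Chars.join [] ps := by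
  cases ps with
  | nil => simp [PySem.Chars.join, List.intercalate]
  | cons q qs => simp [PySem.Chars.join, List.intercalate, List.intersperse]

theorem pvGo_join (cs : List Char) :
    PySem.Chars.join [] (pvGo cs) = pvFA false cs := by
  induction cs using pvGo.induct with
  | case1 => simp [pvGo, pvFA, PySem.Chars.join, List.intercalate]
  | case2 a ih =>
      rw [pvGo, if_pos rfl, join_nil_cons, ih, ← pvRun_spec]
      simp [pvFA]
  | case3 a b h ih =>
      by_cases h2 : a = ']'
      · simp [pvGo, pvFA, h2, ih]
      · simp [pvGo, pvFA, h, h2, ih]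

-- ===== VERDICT (by name: the statement is the Claim_ definition above) =====
theorem getHaakjes_spec : Claim_equal_getHaakjes := by
  intro zin _
  unfold Spec_getHaakjes getHaakjes getHaakjes_alt
  rw [pvGo_join, pvFA_foldl]
  simp
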